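-- pv_equiv track=rewrite | github.com/Akshaj1234512/Music-AI | fretting_transformer/scripts/evaluate.py | create_baseline_predictions
-- ===== SOURCE A (Python) =====
-- from typing import List, Dict, Any
--
-- def create_baseline_predictions(input_notes: List[int],
--                               tuning: List[int] = None) -> List[tuple]:
--     """
--     Create simple baseline predictions (lowest fret for each pitch).
--
--     Args:
--         input_notes: List of MIDI pitches
--         tuning: Guitar tuning
--
--     Returns:
--         List of (string, fret) predictions
--     """
--     if tuning is None:
--         tuning = [64, 59, 55, 50, 45, 40]  # Standard tuning
--
--     baseline_tabs = []
--
--     for pitch in input_notes: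
--         # Find lowest fret position
--         best_tab = None
--         min_fret = float('inf')
--
--         for string_idx, open_pitch in enumerate(tuning):
--             fret = pitch - open_pitch
--             if 0 <= fret <= 24 and fret < min_fret:
--                 min_fret = fret
--                 best_tab = (string_idx + 1, fret)  # Convert to 1-based string
--
--         if best_tab is not None:
--             baseline_tabs.append(best_tab)
--         else:
--             # Fallback to first string if no valid position found
--             baseline_tabs.append((1, 0))
--
--     return baseline_tabs
-- ===== SOURCE B (Python) =====
-- def create_baseline_predictions(input_notes, tuning=None):
--     """Build a pitch -> best (string, fret) table once, then do O(1) lookups per note."""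
--     if tuning is None:
--         tuning = [64, 59, 55, 50, 45, 40]
--     table = {}
--     for string_idx, open_pitch in enumerate(tuning):
--         for fret in range(25):
--             pitch = open_pitch + fret
--             if pitch not in table or fret < table[pitch][1]:
--                 table[pitch] = (string_idx + 1, fret)
--     return [table.get(pitch, (1, 0)) for pitch in input_notes]
-- ===== Notes on version B (the rewrite author's own statement) =====
-- stated objective: faster
-- what changed: B precomputes a pitch-to-(string,fret) lookup table from the tuning once (strings in order, frets ascending, keeping the strictly smaller fret), then maps each note through an O(1) dict lookup with the same fallback tab, instead of rescanning the whole tuning per note.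
import Mathlib
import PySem

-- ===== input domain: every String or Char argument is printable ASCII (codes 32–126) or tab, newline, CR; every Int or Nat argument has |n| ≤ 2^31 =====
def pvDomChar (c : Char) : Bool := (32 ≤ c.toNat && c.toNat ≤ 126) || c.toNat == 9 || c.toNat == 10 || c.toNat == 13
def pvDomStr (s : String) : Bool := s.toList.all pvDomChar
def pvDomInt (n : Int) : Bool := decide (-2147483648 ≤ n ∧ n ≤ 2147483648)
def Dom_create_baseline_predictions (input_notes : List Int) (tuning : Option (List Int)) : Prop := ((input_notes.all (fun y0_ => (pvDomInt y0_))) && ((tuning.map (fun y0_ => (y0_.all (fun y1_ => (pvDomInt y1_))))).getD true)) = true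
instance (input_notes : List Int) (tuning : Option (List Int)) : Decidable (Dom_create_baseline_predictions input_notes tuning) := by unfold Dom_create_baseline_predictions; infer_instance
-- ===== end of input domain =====

-- B builds the pitch→(string,fret) table once from the tuning, then maps each note through a dict lookup (objective: faster, one pass per note).

-- ===== PORT A =====
-- inner loop over enumerate(tuning): state = (best_tab, min_fret); min_fret = none means float('inf')
def create_baseline_predictions (input_notes : List Int) (tuning : Option (List Int)) : List (Int × Int) :=
  let tuning := tuning.getD [64, 59, 55, 50, 45, 40]
  input_notes.foldl (fun baseline_tabs pitch =>
    let st := (PySem.List.enumerate tuning 0).foldl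
      (fun (st : Option (Int × Int) × Option Int) si =>
        let fret := pitch - si.2
        if (decide (0 ≤ fret) && decide (fret ≤ 24) && (match st.2 with | none => true | some m => decide (fret < m))) then
          (some (si.1 + 1, fret), some fret)
        else st)
      (none, none)
    match st.1 with
    | some best_tab => baseline_tabs ++ [best_tab]
    | none => baseline_tabs ++ [((1 : Int), (0 : Int))])
  []

-- ===== PORT B =====
def create_baseline_predictions_alt (input_notes : List Int) (tuning : Option (List Int)) : List (Int × Int) :=
  let tuning := tuning.getD [64, 59, 55, 50, 45, 40]
  let table := (PySem.List.enumerate tuning 0).foldl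
    (fun (d : PySem.Dict Int (Int × Int)) si =>
      (PySem.List.pyRange 0 25 1).foldl
        (fun d fret =>
          let pitch := si.2 + fret
          match PySem.Dict.get? d pitch with
          | none => PySem.Dict.insert d pitch (si.1 + 1, fret)
          | some t => if fret < t.2 then PySem.Dict.insert d pitch (si.1 + 1, fret) else d)
        d)
    PySem.Dict.empty
  input_notes.map (fun pitch => PySem.Dict.getD table pitch (1, 0))

-- ===== PRECONDITION & SPEC =====
def Spec_create_baseline_predictions (input_notes : List Int) (tuning : Option (List Int)) (out : List (Int × Int)) : Prop := out = create_baseline_predictions_alt input_notes tuning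
instance (input_notes : List Int) (tuning : Option (List Int)) (out : List (Int × Int)) : Decidable (Spec_create_baseline_predictions input_notes tuning out) := by unfold Spec_create_baseline_predictions; infer_instance

-- ===== CLAIM (what is proved, stated in full; the proofs are below) =====
def Claim_equal_create_baseline_predictions : Prop := ∀ (input_notes : List Int) (tuning : Option (List Int)), Dom_create_baseline_predictions input_notes tuning → Spec_create_baseline_predictions input_notes tuning (create_baseline_predictions input_notes tuning)

-- ===== LEMMAS AND PROOFS =====

-- the value A's inner loop tracks, abstracted to just the best tab (min_fret is its second component)
def pvBestFold (pitch : Int) (L : List (Int × Int)) (b : Option (Int × Int)) : Option (Int × Int) :=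
  L.foldl (fun b si =>
    let fret := pitch - si.2
    if (decide (0 ≤ fret) && decide (fret ≤ 24) && (match b with | none => true | some t => decide (fret < t.2))) then
      some (si.1 + 1, fret)
    else b) b

lemma pvBestFold_cons (pitch : Int) (si : Int × Int) (L : List (Int × Int)) (b : Option (Int × Int)) :
    pvBestFold pitch (si :: L) b =
    pvBestFold pitch L
      (if (decide (0 ≤ pitch - si.2) && decide (pitch - si.2 ≤ 24) && (match b with | none => true | some t => decide (pitch - si.2 < t.2))) then
        some (si.1 + 1, pitch - si.2)
      else b) := rfl

-- A's inner fold carries min_fret = best.map snd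
lemma pvInnerA_eq (pitch : Int) (L : List (Int × Int)) (b : Option (Int × Int)) :
    L.foldl (fun (st : Option (Int × Int) × Option Int) si =>
        let fret := pitch - si.2
        if (decide (0 ≤ fret) && decide (fret ≤ 24) && (match st.2 with | none => true | some m => decide (fret < m))) then
          (some (si.1 + 1, fret), some fret)
        else st)
      (b, b.map Prod.snd)
    = (pvBestFold pitch L b, (pvBestFold pitch L b).map Prod.snd) := by
  induction L generalizing b with
  | nil => simp [pvBestFold]
  | cons si L ih =>
    rw [List.foldl_cons, pvBestFold_cons]
    cases b with
    | none =>
      simp only [Option.map_none]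
      cases hc : (decide (0 ≤ pitch - si.2) && decide (pitch - si.2 ≤ 24) && true) with
      | true => simpa using ih (some (si.1 + 1, pitch - si.2))
      | false => simpa using ih none
    | some t =>
      simp only [Option.map_some]
      cases hc : (decide (0 ≤ pitch - si.2) && decide (pitch - si.2 ≤ 24) && decide (pitch - si.2 < t.2)) with
      | true => simpa using ih (some (si.1 + 1, pitch - si.2))
      | false => simpa using ih (some t)

-- one string's fret loop, viewed at a single pitch: it performs at most the one relevant update
lemma pvFretFold_get? (fs : List Int) (hnd : fs.Nodup) (d : PySem.Dict Int (Int × Int))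
    (i op pitch : Int) :
    PySem.Dict.get?
      (fs.foldl (fun d fret =>
        match PySem.Dict.get? d (op + fret) with
        | none => PySem.Dict.insert d (op + fret) (i + 1, fret)
        | some t => if fret < t.2 then PySem.Dict.insert d (op + fret) (i + 1, fret) else d) d)
      pitch
    = if ((pitch - op) ∈ fs ∧ (match PySem.Dict.get? d pitch with | none => true | some t => decide (pitch - op < t.2)) = true) then
        some (i + 1, pitch - op)
      else PySem.Dict.get? d pitch := by
  induction fs generalizing d with
  | nil => simp
  | cons f fs ih =>
    have hnd' : fs.Nodup := hnd.of_cons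
    by_cases hf : f = pitch - op
    · subst hf
      have hnotin : (pitch - op) ∉ fs := (List.nodup_cons.mp hnd).1
      have hop : op + (pitch - op) = pitch := by ring
      simp only [List.foldl_cons, hop]
      cases hd : PySem.Dict.get? d pitch with
      | none =>
        dsimp only
        rw [ih hnd']
        simp [hnotin, PySem.Dict.get?_insert_self]
      | some t =>
        dsimp only
        by_cases hlt : pitch - op < t.2
        · rw [if_pos hlt, ih hnd']
          simp [hnotin, PySem.Dict.get?_insert_self, hlt]
        · rw [if_neg hlt, ih hnd']
          simp [hnotin, hd, hlt]
    · have hkey : op + f ≠ pitch := fun h => hf (by omega)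
      simp only [List.foldl_cons]
      cases hd : PySem.Dict.get? d (op + f) with
      | none =>
        dsimp only
        rw [ih hnd']
        rw [PySem.Dict.get?_insert, if_neg (Ne.symm hkey)]
        simp [Ne.symm hf]
      | some t =>
        dsimp only
        by_cases hlt : f < t.2
        · rw [if_pos hlt, ih hnd']
          rw [PySem.Dict.get?_insert, if_neg (Ne.symm hkey)]
          simp [Ne.symm hf]
        · rw [if_neg hlt, ih hnd']
          simp [Ne.symm hf]

lemma pvRange25_nodup : (PySem.List.pyRange 0 25 1).Nodup := by decide

lemma pvMem_range25 (x : Int) : x ∈ PySem.List.pyRange 0 25 1 ↔ 0 ≤ x ∧ x ≤ 24 := by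
  rw [PySem.List.mem_pyRange_one]; omega

-- B's table build over any list of (index, open_pitch) pairs, at a single pitch, is A's best-fold
lemma pvTable_get? (L : List (Int × Int)) (d : PySem.Dict Int (Int × Int)) (pitch : Int) :
    PySem.Dict.get?
      (L.foldl (fun d si =>
        (PySem.List.pyRange 0 25 1).foldl
          (fun d fret =>
            match PySem.Dict.get? d (si.2 + fret) with
            | none => PySem.Dict.insert d (si.2 + fret) (si.1 + 1, fret)
            | some t => if fret < t.2 then PySem.Dict.insert d (si.2 + fret) (si.1 + 1, fret) else d)
          d) d)
      pitch
    = pvBestFold pitch L (PySem.Dict.get? d pitch) := by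
  induction L generalizing d with
  | nil => simp [pvBestFold]
  | cons si L ih =>
    simp only [List.foldl_cons]
    rw [ih, pvFretFold_get? _ pvRange25_nodup, pvBestFold_cons]
    congr 1
    cases hd : PySem.Dict.get? d pitch with
    | none =>
      simp only [pvMem_range25]
      by_cases h : 0 ≤ pitch - si.2 ∧ pitch - si.2 ≤ 24
      · rw [if_pos ⟨h, by trivial⟩, if_pos (by simp only [Bool.and_eq_true, decide_eq_true_eq]; exact ⟨⟨h.1, h.2⟩, trivial⟩)]
      · rw [if_neg (fun hh => h hh.1), if_neg (by simpa using h)]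
    | some t =>
      simp only [pvMem_range25]
      by_cases h : 0 ≤ pitch - si.2 ∧ pitch - si.2 ≤ 24 ∧ pitch - si.2 < t.2
      · rw [if_pos ⟨⟨h.1, h.2.1⟩, by simp [h.2.2]⟩, if_pos (by simp only [Bool.and_eq_true, decide_eq_true_eq]; omega)]
      · rw [if_neg (fun hh => h ⟨hh.1.1, hh.1.2, by simpa using hh.2⟩),
            if_neg (by simp only [Bool.and_eq_true, decide_eq_true_eq]; tauto)]

-- per-pitch agreement, for a fixed resolved tuning
lemma pv_per_pitch (tuning : List Int) (pitch : Int) :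
    PySem.Dict.getD
      ((PySem.List.enumerate tuning 0).foldl
        (fun (d : PySem.Dict Int (Int × Int)) si =>
          (PySem.List.pyRange 0 25 1).foldl
            (fun d fret =>
              match PySem.Dict.get? d (si.2 + fret) with
              | none => PySem.Dict.insert d (si.2 + fret) (si.1 + 1, fret)
              | some t => if fret < t.2 then PySem.Dict.insert d (si.2 + fret) (si.1 + 1, fret) else d)
            d)
        PySem.Dict.empty)
      pitch (1, 0)
    = (match (pvBestFold pitch (PySem.List.enumerate tuning 0) none) with
       | some bt => bt
       | none => ((1 : Int), (0 : Int))) := by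
  rw [PySem.Dict.getD_eq_get?_getD, pvTable_get?]
  simp only [PySem.Dict.get?_empty]
  cases pvBestFold pitch (PySem.List.enumerate tuning 0) none <;> simp

lemma pvA_fold (tn : List Int) (notes : List Int) (acc : List (Int × Int)) :
    notes.foldl (fun baseline_tabs pitch =>
      match ((PySem.List.enumerate tn 0).foldl
          (fun (st : Option (Int × Int) × Option Int) si =>
            if (decide (0 ≤ pitch - si.2) && decide (pitch - si.2 ≤ 24) && (match st.2 with | none => true | some m => decide (pitch - si.2 < m))) then
              (some (si.1 + 1, pitch - si.2), some (pitch - si.2))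
            else st)
          (none, none)).1 with
      | some best_tab => baseline_tabs ++ [best_tab]
      | none => baseline_tabs ++ [((1 : Int), (0 : Int))]) acc
    = acc ++ notes.map (fun pitch =>
        match pvBestFold pitch (PySem.List.enumerate tn 0) none with
        | some bt => bt
        | none => ((1 : Int), (0 : Int))) := by
  induction notes generalizing acc with
  | nil => simp
  | cons p notes ih =>
    simp only [List.foldl_cons, List.map_cons]
    have hA := pvInnerA_eq p (PySem.List.enumerate tn 0) none
    simp only [Option.map_none] at hA
    rw [hA, ih]
    cases pvBestFold p (PySem.List.enumerate tn 0) none <;> simp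

-- ===== VERDICT (by name: the statement is the Claim_ definition above) =====
theorem create_baseline_predictions_spec : Claim_equal_create_baseline_predictions := by
  intro input_notes tuning _
  unfold Spec_create_baseline_predictions create_baseline_predictions create_baseline_predictions_alt
  simp only []
  rw [pvA_fold]
  simp only [List.nil_append]
  exact List.map_congr_left fun pitch _ =>
    (pv_per_pitch (tuning.getD [64, 59, 55, 50, 45, 40]) pitch).symm
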